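-- pv_equiv track=rewrite | github.com/Dortheay/TestTailor | python_code_structure_parser.py | _find_function_boundaries
-- ===== SOURCE A (Python) =====
-- from typing import List, Optional, Dict, Tuple
--
-- def _find_function_boundaries(lines: List[str]) -> List[Tuple[int, int]]:
--     """Find function boundaries"""
--     boundaries = []
--     current_start = None
--
--     for i, line in enumerate(lines):
--         stripped = line.strip()
--         if stripped.startswith('def ') and not stripped.startswith('#'):
--             if current_start is not None:
--                 boundaries.append((current_start, i))
--             current_start = i
--
--     if current_start is not None:
--         boundaries.append((current_start, len(lines)))
--
--     return boundaries
-- ===== SOURCE B (Python) =====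
-- from typing import List, Tuple
--
-- def _find_function_boundaries(lines: List[str]) -> List[Tuple[int, int]]:
--     """Find function boundaries"""
--     boundaries = []
--     end = len(lines)
--     for i, line in reversed(list(enumerate(lines))):
--         if line.strip().startswith('def '):
--             boundaries.append((i, end))
--             end = i
--     boundaries.reverse()
--     return boundaries
-- ===== Notes on version B (the rewrite author's own statement) =====
-- stated objective: alternative
-- what changed: Scans the lines BACKWARDS carrying the end boundary of the most recently seen def downwards: each def line is closed immediately against the previously seen (i.e. next in file order) boundary and the result is reversed at the end, instead of A's forward pass that defers each emit until the next def is found via a current_start state variable; the vacuous '#' guard is dropped since a stripped line starting with 'def ' never starts with '#'.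
import Mathlib
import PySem

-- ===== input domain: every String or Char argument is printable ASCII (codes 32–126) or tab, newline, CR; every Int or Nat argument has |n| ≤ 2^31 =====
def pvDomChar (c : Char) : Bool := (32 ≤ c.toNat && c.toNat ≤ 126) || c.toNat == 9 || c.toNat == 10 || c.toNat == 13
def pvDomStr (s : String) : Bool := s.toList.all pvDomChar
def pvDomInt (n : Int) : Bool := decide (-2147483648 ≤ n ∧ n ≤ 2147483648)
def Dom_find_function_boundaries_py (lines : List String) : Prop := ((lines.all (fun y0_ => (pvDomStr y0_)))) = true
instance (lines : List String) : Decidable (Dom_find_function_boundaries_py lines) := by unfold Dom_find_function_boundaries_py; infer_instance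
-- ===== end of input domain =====

-- B scans backwards carrying the next boundary downwards and reverses at the end,
-- instead of A's forward current_start state machine; same O(n) cost.


-- ===== PORT A =====
-- A's loop body: on a def line, emit (current_start, i) if current_start is set and set current_start := i
def pvStepA (st : List (Int × Int) × Option Int) (p : Int × String) : List (Int × Int) × Option Int :=
  let stripped := PySem.Str.strip p.2
  if PySem.Str.startswith stripped "def " && !(PySem.Str.startswith stripped "#") then
    match st.2 with
    | some c => (st.1 ++ [(c, p.1)], some p.1)
    | none   => (st.1, some p.1)
  else st

-- literal transliteration of A: fold over enumerate carrying (boundaries, current_start)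
def find_function_boundaries_py (lines : List String) : List (Int × Int) :=
  let st := (PySem.List.enumerate lines).foldl pvStepA ([], none)
  match st.2 with
  | some c => st.1 ++ [(c, (lines.length : Int))]
  | none   => st.1

-- ===== PORT B =====
-- B's loop body: on a def line, append (i, end) and move end down to i
def pvStepB (st : List (Int × Int) × Int) (p : Int × String) : List (Int × Int) × Int :=
  if PySem.Str.startswith (PySem.Str.strip p.2) "def " then (st.1 ++ [(p.1, st.2)], p.1) else st

-- literal transliteration of B: backward scan over reversed enumerate, then reverse the result
def find_function_boundaries_py_alt (lines : List String) : List (Int × Int) :=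
  let st := ((PySem.List.enumerate lines).reverse).foldl pvStepB ([], (lines.length : Int))
  st.1.reverse

-- ===== PRECONDITION & SPEC =====
def Spec_find_function_boundaries_py (lines : List String) (out : List (Int × Int)) : Prop := out = find_function_boundaries_py_alt lines
instance (lines : List String) (out : List (Int × Int)) : Decidable (Spec_find_function_boundaries_py lines out) := by unfold Spec_find_function_boundaries_py; infer_instance

-- ===== CLAIM (what is proved, stated in full; the proofs are below) =====
def Claim_equal_find_function_boundaries_py : Prop := ∀ (lines : List String), Dom_find_function_boundaries_py lines → Spec_find_function_boundaries_py lines (find_function_boundaries_py lines)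

-- ===== LEMMAS AND PROOFS =====

-- index of a top-level def line, else nothing (shared characterisation of both guards)
def pvStart (p : Int × String) : Option Int :=
  if PySem.Str.startswith (PySem.Str.strip p.2) "def " then some p.1 else none

-- common normal form: each start paired with the next start (or L for the last)
def pvPairs (ss : List Int) (L : Int) : List (Int × Int) :=
  match ss with
  | []     => []
  | s :: t => (s, t.headD L) :: pvPairs t L

-- A's pairing with a threaded current_start
def pvPair (cs : Option Int) (ss : List Int) (L : Int) : List (Int × Int) :=
  match cs, ss with
  | none,   []      => []
  | some c, []      => [(c, L)]
  | none,   s :: t  => pvPair (some s) t L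
  | some c, s :: t  => (c, s) :: pvPair (some s) t L

-- a line starting with "def " cannot start with "#", so A's '#' guard is vacuous
theorem not_hash (l : List Char) (h : PySem.Chars.startswith l ['d', 'e', 'f', ' '] = true) :
    PySem.Chars.startswith l ['#'] = false := by
  rcases (PySem.Chars.startswith_iff _ _).mp h with ⟨t1, e1⟩
  cases hx : PySem.Chars.startswith l ['#'] with
  | false => rfl
  | true =>
    rcases (PySem.Chars.startswith_iff _ _).mp hx with ⟨t2, e2⟩
    rw [← e1] at e2
    simp at e2

-- A's guard coincides with the shared predicate
theorem stepA_eq (st : List (Int × Int) × Option Int) (p : Int × String) :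
    pvStepA st p
      = if PySem.Str.startswith (PySem.Str.strip p.2) "def " = true then
          (match st.2 with
           | some c => (st.1 ++ [(c, p.1)], some p.1)
           | none   => (st.1, some p.1))
        else st := by
  unfold pvStepA
  cases h : PySem.Str.startswith (PySem.Str.strip p.2) "def " with
  | false => simp at h; simp [h]
  | true =>
    simp at h
    have hh := not_hash _ h
    simp [h, hh]

-- A's loop from any state, then the final flush, equals acc ++ pvPair of the remaining starts
theorem loopA_eq (es : List (Int × String)) (acc : List (Int × Int)) (cs : Option Int) (L : Int) :
    (match (es.foldl pvStepA (acc, cs)).2 with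
     | some c => (es.foldl pvStepA (acc, cs)).1 ++ [(c, L)]
     | none   => (es.foldl pvStepA (acc, cs)).1)
    = acc ++ pvPair cs (es.filterMap pvStart) L := by
  induction es generalizing acc cs with
  | nil => cases cs <;> simp [pvPair]
  | cons p t ih =>
    simp only [List.foldl_cons, List.filterMap_cons, stepA_eq, pvStart]
    by_cases h : PySem.Str.startswith (PySem.Str.strip p.2) "def " = true
    · simp only [if_pos h]
      cases cs with
      | none => rw [ih acc (some p.1)]; simp [pvPair, pvStart]
      | some c => rw [ih (acc ++ [(c, p.1)]) (some p.1)]; simp [pvPair, pvStart]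
    · simp only [if_neg h]
      exact ih acc cs

-- pvPair equals the shared normal form
theorem pvPair_some_eq (t : List Int) (c L : Int) :
    pvPair (some c) t L = (c, t.headD L) :: pvPairs t L := by
  induction t generalizing c with
  | nil => simp [pvPair, pvPairs]
  | cons s u ih => simp [pvPair, pvPairs, ih]

theorem pvPair_none_eq (ss : List Int) (L : Int) : pvPair none ss L = pvPairs ss L := by
  cases ss with
  | nil => rfl
  | cons s t => simpa [pvPair, pvPairs] using pvPair_some_eq t s L

-- B's backward loop (as a foldr) computes the reversed normal form and the first start
theorem loopB_eq (es : List (Int × String)) (L : Int) :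
    es.foldr (fun p st => pvStepB st p) ([], L)
      = ((pvPairs (es.filterMap pvStart) L).reverse, (es.filterMap pvStart).headD L) := by
  induction es with
  | nil => simp [pvPairs]
  | cons p t ih =>
    rw [List.foldr_cons, ih]
    by_cases h : PySem.Str.startswith (PySem.Str.strip p.2) "def " = true
    · simp only [pvStepB, pvStart, List.filterMap_cons, h, if_pos, pvPairs,
        List.reverse_cons, List.headD_cons]
    · simp only [pvStepB, pvStart, List.filterMap_cons, h, if_false,
        Bool.false_eq_true]

-- ===== VERDICT (by name: the statement is the Claim_ definition above) =====
theorem find_function_boundaries_py_spec : Claim_equal_find_function_boundaries_py := by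
  intro lines _
  show find_function_boundaries_py lines = find_function_boundaries_py_alt lines
  unfold find_function_boundaries_py find_function_boundaries_py_alt
  rw [List.foldl_reverse]
  rw [loopB_eq]
  simpa [pvPair_none_eq] using
    loopA_eq (PySem.List.enumerate lines) [] none (lines.length : Int)
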